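-- pv_equiv track=rewrite | github.com/WallerTsai/OJ-Solution | leetcode-py/模板集/他人模板/unnamed1.py | countCoprime
-- ===== SOURCE A (Python) =====
-- import functools
-- from typing import List, Dict, Tuple, Optional
-- import math
-- import math
--
-- def countCoprime(mat: List[List[int]]) -> int:
--     MOD = 1_000_000_007
--     @functools.lru_cache(None)  # 缓存装饰器，避免重复计算 dfs（一行代码实现记忆化）
--     def dfs(i: int, g: int) -> int:
--         if i < 0:
--             return 1 if g == 1 else 0
--         return sum(dfs(i - 1, math.gcd(g, x)) for x in mat[i]) % MOD
--     return dfs(len(mat) - 1, 0)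
-- ===== SOURCE B (Python) =====
-- import math
-- from typing import List
--
--
-- def countCoprime(mat: List[List[int]]) -> int:
--     MOD = 1_000_000_007
--     counts = {0: 1}  # accumulated gcd value -> number of ways (mod MOD)
--     for row in mat:
--         new = {}
--         for g, c in counts.items():
--             for x in row:
--                 ng = math.gcd(g, x)
--                 new[ng] = (new.get(ng, 0) + c) % MOD
--         counts = new
--     return counts.get(1, 0) % MOD
-- ===== Notes on version B (the rewrite author's own statement) =====
-- stated objective: alternative
-- what changed: Replaces A's top-down lru_cache recursion over row indices (summing over each row's elements with per-level mod) by an iterative forward DP that maintains a dict from accumulated gcd value to number of ways, seeded with {0:1}, rebuilt row by row.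
import Mathlib
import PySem

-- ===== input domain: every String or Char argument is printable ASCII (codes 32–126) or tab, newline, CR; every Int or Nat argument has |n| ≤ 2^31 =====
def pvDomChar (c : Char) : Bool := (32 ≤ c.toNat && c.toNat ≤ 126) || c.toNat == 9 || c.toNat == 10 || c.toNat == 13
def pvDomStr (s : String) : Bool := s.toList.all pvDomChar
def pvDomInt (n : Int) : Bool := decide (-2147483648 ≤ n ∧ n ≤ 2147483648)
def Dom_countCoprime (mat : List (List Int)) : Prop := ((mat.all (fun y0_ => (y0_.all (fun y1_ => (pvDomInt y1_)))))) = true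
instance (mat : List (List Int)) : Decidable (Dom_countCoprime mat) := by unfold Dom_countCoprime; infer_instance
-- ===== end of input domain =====

-- B replaces A's top-down memoized recursion over row indices by an iterative forward DP
-- over the rows maintaining a dict from accumulated gcd value to way-count (objective: alternative).

-- math.gcd(g, x): nonnegative gcd (exact for all Python ints)
def pvGcd (g x : Int) : Int := (Int.gcd g x : Int)

-- ===== PORT A =====
-- dfs(i, g) of A with the index shifted by one: pvDfsA mat (i+1) g = dfs(i, g), pvDfsA mat 0 g = dfs(-1, g)
def pvDfsA (mat : List (List Int)) : Nat → Int → Int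
  | 0, g => if g = 1 then 1 else 0
  | i + 1, g =>
      ((((PySem.List.pyGet? mat (i : Int)).getD []).map
          (fun x => pvDfsA mat i (pvGcd g x))).sum) % 1000000007

def countCoprime (mat : List (List Int)) : Int := pvDfsA mat mat.length 0

-- ===== PORT B =====
-- one row of B's DP: rebuild the dict from the (g, c) pairs of `counts` and the row's elements
def pvRowStep (row : List Int) (counts : PySem.Dict Int Int) : PySem.Dict Int Int :=
  counts.items.foldl (fun nw gc =>
    row.foldl (fun nw x =>
      nw.insert (pvGcd gc.1 x) ((nw.getD (pvGcd gc.1 x) 0 + gc.2) % 1000000007)) nw)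
    PySem.Dict.empty

def countCoprime_alt (mat : List (List Int)) : Int :=
  ((mat.foldl (fun counts row => pvRowStep row counts)
      ((PySem.Dict.empty).insert 0 1)).getD 1 0) % 1000000007

-- ===== PRECONDITION & SPEC =====
def Spec_countCoprime (mat : List (List Int)) (out : Int) : Prop := out = countCoprime_alt mat
instance (mat : List (List Int)) (out : Int) : Decidable (Spec_countCoprime mat out) := by unfold Spec_countCoprime; infer_instance

-- ===== CLAIM (what is proved, stated in full; the proofs are below) =====
def Claim_equal_countCoprime : Prop := ∀ (mat : List (List Int)), Dom_countCoprime mat → Spec_countCoprime mat (countCoprime mat)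

-- ===== LEMMAS AND PROOFS =====

-- exact (un-modded) number of element picks, one per row taken front to back, whose
-- gcd accumulated onto g equals 1
def pvCnt : List (List Int) → Int → Int
  | [], g => if g = 1 then 1 else 0
  | r :: rs, g => (r.map (fun x => pvCnt rs (pvGcd g x))).sum

-- weighted sum of a dict's item list: Σ c * f g over the (g, c) pairs
def pvW (L : List (Int × Int)) (f : Int → Int) : Int := (L.map (fun p => p.2 * f p.1)).sum

theorem pvGcd_right_comm (g x y : Int) : pvGcd (pvGcd g y) x = pvGcd (pvGcd g x) y := by
  simp only [pvGcd, Int.gcd, Int.natAbs_natCast]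
  rw [Nat.gcd_assoc, Nat.gcd_assoc, Nat.gcd_comm y.natAbs]

theorem pvSum_swap (a r : List Int) (F : Int → Int → Int) :
    (a.map (fun y => (r.map (F y)).sum)).sum = (r.map (fun x => (a.map (fun y => F y x)).sum)).sum := by
  induction a with
  | nil => simp
  | cons y a ih =>
      simp only [List.map_cons, List.sum_cons, ih, ← PySem.List.sum_map_add_int]

theorem pvCnt_append (rs : List (List Int)) (r : List Int) (g : Int) :
    pvCnt (rs ++ [r]) g = (r.map (fun x => pvCnt rs (pvGcd g x))).sum := by
  induction rs generalizing g with
  | nil => simp [pvCnt]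
  | cons a rs ih =>
      show (a.map (fun y => pvCnt (rs ++ [r]) (pvGcd g y))).sum = _
      simp only [ih]
      rw [pvSum_swap a r (fun y x => pvCnt rs (pvGcd (pvGcd g y) x))]
      simp only [pvCnt]
      congr 1
      refine List.map_congr_left (fun x _ => ?_)
      congr 1
      refine List.map_congr_left (fun y _ => ?_)
      rw [pvGcd_right_comm]

theorem pvCnt_reverse (l : List (List Int)) (g : Int) : pvCnt l.reverse g = pvCnt l g := by
  induction l generalizing g with
  | nil => rfl
  | cons a l ih =>
      rw [List.reverse_cons, pvCnt_append]
      show _ = (a.map (fun x => pvCnt l (pvGcd g x))).sum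
      exact List.map_congr_left (fun x _ => ih _) ▸ rfl

theorem pvSum_emod (l : List Int) (h : Int → Int) :
    (l.map (fun x => h x % 1000000007)).sum % 1000000007 = (l.map h).sum % 1000000007 := by
  induction l with
  | nil => rfl
  | cons a l ih =>
      simp only [List.map_cons, List.sum_cons]
      omega

theorem pvDfsA_eq (mat : List (List Int)) (i : Nat) (hi : i ≤ mat.length) (g : Int) :
    pvDfsA mat i g = pvCnt ((mat.take i).reverse) g % 1000000007 := by
  induction i generalizing g with
  | zero => simp only [pvDfsA, List.take_zero, List.reverse_nil, pvCnt]; split <;> rfl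
  | succ i ih =>
      have hlt : i < mat.length := hi
      rw [pvDfsA, PySem.List.pyGet?_natCast, List.getElem?_eq_getElem hlt]
      simp only [Option.getD_some]
      have : mat.take (i+1) = mat.take i ++ [mat[i]] := by
        rw [List.take_add_one, List.getElem?_eq_getElem hlt]; rfl
      rw [this, List.reverse_append, List.reverse_singleton, List.singleton_append]
      show _ = (mat[i].map (fun x => pvCnt (mat.take i).reverse (pvGcd g x))).sum % 1000000007
      rw [← pvSum_emod mat[i] (fun x => pvCnt (mat.take i).reverse (pvGcd g x))]
      congr 2
      exact List.map_congr_left (fun x _ => ih (le_of_lt hlt) _)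

theorem pvW_append (L L' : List (Int × Int)) (f : Int → Int) :
    pvW (L ++ L') f = pvW L f + pvW L' f := by
  simp [pvW]

theorem pvW_cons (p : Int × Int) (L : List (Int × Int)) (f : Int → Int) :
    pvW (p :: L) f = p.2 * f p.1 + pvW L f := by simp [pvW]

theorem pvW_replace (L : List (Int × Int)) (k v old : Int) (f : Int → Int)
    (hnd : (L.map Prod.fst).Nodup) (hm : (k, old) ∈ L) :
    pvW (L.map (fun p => if p.1 == k then (k, v) else p)) f = pvW L f + (v - old) * f k := by
  induction L with
  | nil => simp at hm
  | cons p L ih =>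
      simp only [List.map_cons, List.nodup_cons, List.mem_map] at hnd
      rcases List.mem_cons.1 hm with h | h
      · subst h
        rw [List.map_cons, if_pos (by simp)]
        have hid : L.map (fun q => if q.1 == k then (k, v) else q) = L.map id :=
          List.map_congr_left (fun q hq => if_neg (by
            simp only [beq_iff_eq]
            exact fun hqk => hnd.1 ⟨q, hq, hqk⟩))
        rw [hid, List.map_id, pvW_cons, pvW_cons]; ring
      · have hpk : p.1 ≠ k := by
          intro hpk
          exact hnd.1 ⟨(k, old), h, hpk.symm⟩
        rw [List.map_cons, if_neg (by simp [hpk]), pvW_cons, pvW_cons, ih hnd.2 h]; ring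

theorem pvW_insert (d : PySem.Dict Int Int) (k v : Int) (f : Int → Int)
    (hnd : d.keys.Nodup) :
    pvW (d.insert k v).items f = pvW d.items f + (v - d.getD k 0) * f k := by
  by_cases hc : d.contains k = true
  · rw [PySem.Dict.items_insert_of_contains d v hc]
    obtain ⟨old, hold⟩ : ∃ old, d.get? k = some old := by
      rw [PySem.Dict.contains_eq_isSome_get?] at hc
      exact Option.isSome_iff_exists.mp hc
    have hm := PySem.Dict.mem_items_of_get?_eq_some d hold
    rw [PySem.Dict.getD_eq_get?_getD, hold]
    refine pvW_replace _ k v old f ?_ hm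
    simpa only [PySem.Dict.keys] using hnd
  · rw [PySem.Dict.items_insert_of_not_contains d v (by simpa using hc), pvW_append,
        PySem.Dict.getD_of_not_contains d 0 (by simpa using hc)]
    simp [pvW]

theorem pvW_ind_zero (L : List (Int × Int)) (h : ∀ p ∈ L, p.1 ≠ (1 : Int)) :
    pvW L (fun g => if g = 1 then 1 else 0) = 0 := by
  induction L with
  | nil => rfl
  | cons p L ih =>
      rw [pvW_cons, if_neg (h p (List.mem_cons_self ..)),
        ih (fun q hq => h q (List.mem_cons_of_mem _ hq))]
      ring

theorem pvW_ind_mem (L : List (Int × Int)) (c : Int)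
    (hnd : (L.map Prod.fst).Nodup) (hm : (1, c) ∈ L) :
    pvW L (fun g => if g = 1 then 1 else 0) = c := by
  induction L with
  | nil => simp at hm
  | cons p L ih =>
      simp only [List.map_cons, List.nodup_cons, List.mem_map] at hnd
      rcases List.mem_cons.1 hm with h | h
      · subst h
        rw [pvW_cons, if_pos rfl, pvW_ind_zero L (fun q hq hq1 => hnd.1 ⟨q, hq, hq1⟩)]
        ring
      · have hp1 : p.1 ≠ 1 := fun hp1 => hnd.1 ⟨(1, c), h, hp1.symm⟩
        rw [pvW_cons, if_neg hp1, ih hnd.2 h]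
        ring

theorem pvW_indicator (d : PySem.Dict Int Int) (hnd : d.keys.Nodup) :
    pvW d.items (fun g => if g = 1 then 1 else 0) = d.getD 1 0 := by
  have hnd' : (d.items.map Prod.fst).Nodup := by simpa only [PySem.Dict.keys] using hnd
  cases hold : d.get? 1 with
  | some c =>
      rw [PySem.Dict.getD_eq_get?_getD, hold]
      exact pvW_ind_mem _ c hnd' (PySem.Dict.mem_items_of_get?_eq_some d hold)
  | none =>
      have hc : d.contains 1 = false := by
        rw [PySem.Dict.contains_eq_isSome_get?, hold]; rfl
      rw [PySem.Dict.getD_of_not_contains d 0 hc]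
      refine pvW_ind_zero _ (fun p hp hp1 => ?_)
      have hm : ((1 : Int), p.2) ∈ d.items := by rw [← hp1]; simpa using hp
      have := PySem.Dict.get?_of_mem_items d hm hnd
      simp [hold] at this

theorem pvEmod_modeq (a : Int) : a % 1000000007 ≡ a [ZMOD 1000000007] :=
  Int.emod_emod_of_dvd a dvd_rfl

theorem pvInner_fold (row : List Int) (d : PySem.Dict Int Int) (g c : Int) (f : Int → Int)
    (hnd : d.keys.Nodup) :
    (row.foldl (fun nw x =>
        nw.insert (pvGcd g x) ((nw.getD (pvGcd g x) 0 + c) % 1000000007)) d).keys.Nodup ∧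
    pvW (row.foldl (fun nw x =>
        nw.insert (pvGcd g x) ((nw.getD (pvGcd g x) 0 + c) % 1000000007)) d).items f ≡
      pvW d.items f + c * (row.map (fun x => f (pvGcd g x))).sum [ZMOD 1000000007] := by
  induction row generalizing d with
  | nil => exact ⟨hnd, by simp⟩
  | cons x row ih =>
      set K := pvGcd g x with hK
      set d' := d.insert K ((d.getD K 0 + c) % 1000000007) with hd'
      have hnd' : d'.keys.Nodup := PySem.Dict.nodup_keys_insert d _ _ hnd
      obtain ⟨hn2, hW2⟩ := ih d' hnd'
      refine ⟨hn2, ?_⟩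
      have h1 : pvW d'.items f ≡ pvW d.items f + c * f K [ZMOD 1000000007] := by
        rw [pvW_insert d K _ f hnd]
        have : ((d.getD K 0 + c) % 1000000007 - d.getD K 0) ≡ c [ZMOD 1000000007] := by
          calc (d.getD K 0 + c) % 1000000007 - d.getD K 0
              ≡ (d.getD K 0 + c) - d.getD K 0 [ZMOD 1000000007] :=
                (pvEmod_modeq _).sub_right _
            _ = c := by ring
        exact (Int.ModEq.refl _).add ((this.mul_right _))
      calc pvW (row.foldl _ d').items f
          ≡ pvW d'.items f + c * (row.map (fun x => f (pvGcd g x))).sum [ZMOD 1000000007] := hW2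
        _ ≡ (pvW d.items f + c * f K) + c * (row.map (fun x => f (pvGcd g x))).sum [ZMOD 1000000007] :=
            h1.add_right _
        _ = pvW d.items f + c * ((List.map (fun x => f (pvGcd g x)) (x :: row)).sum) := by
            simp [List.map_cons]; ring

theorem pvOuter_fold (L : List (Int × Int)) (row : List Int) (d : PySem.Dict Int Int)
    (f : Int → Int) (hnd : d.keys.Nodup) :
    (L.foldl (fun nw gc => row.foldl (fun nw x =>
        nw.insert (pvGcd gc.1 x) ((nw.getD (pvGcd gc.1 x) 0 + gc.2) % 1000000007)) nw) d).keys.Nodup ∧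
    pvW (L.foldl (fun nw gc => row.foldl (fun nw x =>
        nw.insert (pvGcd gc.1 x) ((nw.getD (pvGcd gc.1 x) 0 + gc.2) % 1000000007)) nw) d).items f ≡
      pvW d.items f + pvW L (fun g => (row.map (fun x => f (pvGcd g x))).sum) [ZMOD 1000000007] := by
  induction L generalizing d with
  | nil => exact ⟨hnd, by simp [pvW]⟩
  | cons gc L ih =>
      obtain ⟨hn1, hW1⟩ := pvInner_fold row d gc.1 gc.2 f hnd
      obtain ⟨hn2, hW2⟩ := ih _ hn1
      refine ⟨hn2, ?_⟩
      calc pvW _ f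
          ≡ _ + pvW L (fun g => (row.map (fun x => f (pvGcd g x))).sum) [ZMOD 1000000007] := hW2
        _ ≡ (pvW d.items f + gc.2 * (row.map (fun x => f (pvGcd gc.1 x))).sum)
              + pvW L (fun g => (row.map (fun x => f (pvGcd g x))).sum) [ZMOD 1000000007] :=
            hW1.add_right _
        _ = pvW d.items f + pvW (gc :: L) (fun g => (row.map (fun x => f (pvGcd g x))).sum) := by
            rw [pvW_cons]; ring

theorem pvRowStep_facts (row : List Int) (d : PySem.Dict Int Int) (f : Int → Int) :
    (pvRowStep row d).keys.Nodup ∧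
    pvW (pvRowStep row d).items f ≡
      pvW d.items (fun g => (row.map (fun x => f (pvGcd g x))).sum) [ZMOD 1000000007] := by
  obtain ⟨hn, hW⟩ := pvOuter_fold d.items row PySem.Dict.empty f (by decide)
  refine ⟨hn, ?_⟩
  calc pvW (pvRowStep row d).items f
      ≡ pvW (PySem.Dict.empty : PySem.Dict Int Int).items f
          + pvW d.items (fun g => (row.map (fun x => f (pvGcd g x))).sum) [ZMOD 1000000007] := hW
    _ = pvW d.items (fun g => (row.map (fun x => f (pvGcd g x))).sum) := by
        simp [pvW, PySem.Dict.empty]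

theorem pvMain_inv (rs : List (List Int)) (d : PySem.Dict Int Int) (hnd : d.keys.Nodup) :
    (rs.foldl (fun counts row => pvRowStep row counts) d).getD 1 0 ≡
      pvW d.items (pvCnt rs) [ZMOD 1000000007] := by
  induction rs generalizing d with
  | nil =>
      rw [List.foldl_nil, ← pvW_indicator d hnd]
      exact Int.ModEq.refl _
  | cons row rs ih =>
      obtain ⟨hn1, hW1⟩ := pvRowStep_facts row d (pvCnt rs)
      calc ((row :: rs).foldl (fun counts row => pvRowStep row counts) d).getD 1 0
          ≡ pvW (pvRowStep row d).items (pvCnt rs) [ZMOD 1000000007] := ih _ hn1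
        _ ≡ pvW d.items (fun g => (row.map (fun x => pvCnt rs (pvGcd g x))).sum) [ZMOD 1000000007] := hW1
        _ = pvW d.items (pvCnt (row :: rs)) := rfl

-- ===== VERDICT (by name: the statement is the Claim_ definition above) =====
theorem countCoprime_spec : Claim_equal_countCoprime := by
  intro mat _
  show countCoprime mat = countCoprime_alt mat
  have hA : countCoprime mat = pvCnt mat 0 % 1000000007 := by
    rw [countCoprime, pvDfsA_eq mat mat.length le_rfl, List.take_length, pvCnt_reverse]
  have hinv := pvMain_inv mat ((PySem.Dict.empty : PySem.Dict Int Int).insert 0 1) (by decide)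
  have hw : pvW ((PySem.Dict.empty : PySem.Dict Int Int).insert 0 1).items (pvCnt mat)
      = pvCnt mat 0 := by
    show pvW [((0 : Int), (1 : Int))] (pvCnt mat) = pvCnt mat 0
    simp [pvW]
  rw [hw] at hinv
  rw [hA, countCoprime_alt]
  exact hinv.symm
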